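-- pv_equiv track=rewrite | github.com/swissarthurfreeman/Greedy | FreemanArthur.py | save_files_number
-- ===== SOURCE A (Python) =====
-- def save_files_number(files, space):
--     weight = 0
--     to_take = []
--     #En triant du plus petit au plus grand, on prends d'abord
--     files.sort(key=lambda x : x[1]) #les fichiers les plus petits.
--
--     for i in range(0, len(files)): #On les prends jusqu'à ce qu'on ne puisse plus.
--         if weight + files[i][1] < space:
--             weight += files[i][1]
--             to_take.append(files[i])
--     return to_take
-- ===== SOURCE B (Python) =====
-- def save_files_number(files, space):
--     # Selection-based greedy: no sort. Repeatedly extract the smallest remaining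
--     # file (first one on ties, matching a stable sort's order); stop as soon as
--     # the smallest remaining file no longer fits, since every other remaining
--     # file is at least as large. Unlike A, this does not mutate `files`.
--     remaining = list(files)
--     taken, weight = [], 0
--     while remaining:
--         m = min(remaining, key=lambda f: f[1])
--         if weight + m[1] >= space:
--             break
--         weight += m[1]
--         taken.append(m)
--         remaining.remove(m)
--     return taken
-- ===== Notes on version B (the rewrite author's own statement) =====
-- stated objective: alternative
-- what changed: B drops the sort entirely: a selection loop repeatedly extracts the first minimum-size file from the remaining list and stops early as soon as the smallest remaining file no longer fits (A sorts in place and scans the whole sorted list with a running weight); B does not mutate the input list.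
import Mathlib
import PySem

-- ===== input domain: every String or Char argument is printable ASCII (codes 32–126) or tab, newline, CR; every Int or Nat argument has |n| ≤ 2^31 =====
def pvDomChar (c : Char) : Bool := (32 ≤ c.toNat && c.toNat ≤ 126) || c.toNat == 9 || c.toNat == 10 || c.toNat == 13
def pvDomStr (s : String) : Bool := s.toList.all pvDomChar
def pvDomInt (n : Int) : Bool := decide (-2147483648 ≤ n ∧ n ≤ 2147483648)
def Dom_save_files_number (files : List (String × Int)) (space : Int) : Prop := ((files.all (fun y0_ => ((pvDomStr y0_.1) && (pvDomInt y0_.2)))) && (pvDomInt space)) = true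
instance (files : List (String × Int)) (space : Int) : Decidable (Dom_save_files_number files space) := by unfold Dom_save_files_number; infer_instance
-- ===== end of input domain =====

-- B replaces A's sort-then-scan with a sort-free selection greedy: repeatedly extract the
-- first minimum-size file, stopping as soon as the smallest remaining file does not fit
-- (objective: alternative). Equivalence is about the RETURN value: A sorts `files` in
-- place, B does not mutate it.

-- ===== PORT A =====
def save_files_number (files : List (String × Int)) (space : Int) : List (String × Int) :=
  let fs := PySem.List.sorted files (fun x => x.2)
  let r := (PySem.List.pyRange 0 (fs.length : Int) 1).foldl
    (fun (st : Int × List (String × Int)) i =>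
      let f := PySem.List.pyGetD fs i ("", 0)   -- i always in range (range(0, len(files)))
      if st.1 + f.2 < space then (st.1 + f.2, st.2 ++ [f]) else st)
    (0, [])
  r.2

-- ===== PORT B =====
-- termination helper for the selection loop: list.remove shortens the list
theorem pv_remove?_length {α : Type} [BEq α] [LawfulBEq α] {xs r : List α} {v : α}
    (h : PySem.List.remove? xs v = some r) : r.length < xs.length := by
  have hv : v ∈ xs := by
    by_contra hnv
    rw [(PySem.List.remove?_eq_none_iff xs v).mpr hnv] at h
    simp at h
  rw [PySem.List.remove?_eq_some_erase xs v hv, Option.some.injEq] at h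
  subst h
  have h1 := List.length_erase_of_mem hv
  have h2 : xs.length ≠ 0 := by
    intro h0; rw [List.length_eq_zero_iff.mp h0] at hv; simp at hv
  omega

-- Source B's while-loop: each turn takes the first minimum-size remaining file if it fits,
-- otherwise (or when nothing remains) stops
def pvAltGo (space weight : Int) (taken remaining : List (String × Int)) : List (String × Int) :=
  match PySem.List.min? remaining (fun f => f.2) with
  | none => taken                               -- `while remaining:` exits
  | some m =>
    if weight + m.2 ≥ space then taken          -- `break`
    else
      match hr : PySem.List.remove? remaining m with
      | none => taken                           -- unreachable: m ∈ remaining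
      | some rest => pvAltGo space (weight + m.2) (taken ++ [m]) rest
termination_by remaining.length
decreasing_by exact pv_remove?_length hr

def save_files_number_alt (files : List (String × Int)) (space : Int) : List (String × Int) :=
  pvAltGo space 0 [] files

-- ===== PRECONDITION & SPEC =====
def Spec_save_files_number (files : List (String × Int)) (space : Int) (out : List (String × Int)) : Prop := out = save_files_number_alt files space
instance (files : List (String × Int)) (space : Int) (out : List (String × Int)) : Decidable (Spec_save_files_number files space out) := by unfold Spec_save_files_number; infer_instance

-- ===== CLAIM (what is proved, stated in full; the proofs are below) =====
def Claim_equal_save_files_number : Prop := ∀ (files : List (String × Int)) (space : Int), Dom_save_files_number files space → Spec_save_files_number files space (save_files_number files space)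

-- ===== LEMMAS AND PROOFS =====

-- min over a list extended on the right, computed from the min of the prefix
theorem pv_min_snoc (xs : List (String × Int)) (x : String × Int) :
    PySem.List.min? (xs ++ [x]) (fun f => f.2)
      = match PySem.List.min? xs (fun f => f.2) with
        | none => some x
        | some m => if x.2 < m.2 then some x else some m := by
  cases h : PySem.List.min? xs (fun f => f.2) <;>
    · simp only [PySem.List.min?] at h ⊢
      rw [List.foldl_append, h]
      simp [List.foldl]

-- sorting a list extended on the right = insert the new element into the sorted prefix
theorem pv_sorted_snoc (xs : List (String × Int)) (x : String × Int) :
    PySem.List.sorted (xs ++ [x]) (fun f => f.2)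
      = PySem.List.insertBy (fun a b => decide (a.2 < b.2)) x (PySem.List.sorted xs (fun f => f.2)) := by
  rw [PySem.List.sorted_eq_foldl_insertBy, PySem.List.sorted_eq_foldl_insertBy, List.foldl_append]
  simp [List.foldl]

-- the stable sort decomposes as: first minimum-size element, then the sort of the rest
theorem pv_sorted_decomp :
    ∀ (l : List (String × Int)) (m : String × Int),
      PySem.List.min? l (fun f => f.2) = some m →
      PySem.List.sorted l (fun f => f.2) = m :: PySem.List.sorted (l.erase m) (fun f => f.2) := by
  intro l
  induction l using List.reverseRecOn with
  | nil => intro m h; simp [PySem.List.min?] at h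
  | append_singleton xs x ih =>
    intro m h
    rw [pv_min_snoc] at h
    rw [pv_sorted_snoc]
    cases hxs : PySem.List.min? xs (fun f => f.2) with
    | none =>
      have hnil : xs = [] := (PySem.List.min?_eq_none_iff xs (fun f => f.2)).mp hxs
      subst hnil
      rw [hxs] at h
      simp only [Option.some.injEq] at h
      subst h
      simp [PySem.List.sorted, PySem.List.insertBy]
    | some m0 =>
      rw [hxs] at h
      have hdec := ih m0 hxs
      rw [hdec]
      by_cases hlt : x.2 < m0.2
      · simp only [if_pos hlt, Option.some.injEq] at h
        subst h
        have hnotmem : x ∉ xs := by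
          intro hmem
          exact absurd (PySem.List.min?_isMin hxs x hmem) (by omega)
        rw [List.erase_append_right _ hnotmem]
        simp only [List.erase_cons_head]  -- [m].erase m = []
        rw [List.append_nil, hdec]
        simp [PySem.List.insertBy, hlt]
      · simp only [if_neg hlt, Option.some.injEq] at h
        subst h
        have hmem : m0 ∈ xs := PySem.List.min?_mem hxs
        rw [List.erase_append_left _ hmem]
        rw [pv_sorted_snoc]
        simp [PySem.List.insertBy, hlt]

-- A's loop body
def pvStep (space : Int) (st : Int × List (String × Int)) (f : String × Int) : Int × List (String × Int) :=
  if st.1 + f.2 < space then (st.1 + f.2, st.2 ++ [f]) else st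

-- once the greedy scan cannot take an element, it takes nothing further
theorem pv_skip_all (space : Int) (rest : List (String × Int)) :
    ∀ (w : Int) (acc : List (String × Int)),
    (∀ x ∈ rest, ¬ (w + x.2 < space)) →
    rest.foldl (pvStep space) (w, acc) = (w, acc) := by
  induction rest with
  | nil => intro w acc _; rfl
  | cons x rest ih =>
    intro w acc h
    simp only [List.foldl_cons, pvStep, if_neg (h x (List.mem_cons_self))]
    exact ih w acc (fun y hy => h y (List.mem_cons_of_mem _ hy))

-- the accumulator of A's scan is a pure prefix
theorem pv_acc_prefix (space : Int) (l : List (String × Int)) :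
    ∀ (w : Int) (acc : List (String × Int)),
    (l.foldl (pvStep space) (w, acc)).2 = acc ++ (l.foldl (pvStep space) (w, [])).2 := by
  induction l with
  | nil => intro w acc; simp
  | cons f l ih =>
    intro w acc
    by_cases h : w + f.2 < space
    · simp only [List.foldl_cons, pvStep, if_pos h]
      rw [ih (w + f.2) (acc ++ [f]), ih (w + f.2) ([] ++ [f])]
      simp
    · simp only [List.foldl_cons, pvStep, if_neg h]
      exact ih w acc

-- the selection loop equals A's scan over the sorted remaining list
theorem pv_main (space : Int) :
    ∀ (n : Nat) (l : List (String × Int)), l.length ≤ n →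
    ∀ (w : Int) (taken : List (String × Int)),
    pvAltGo space w taken l
      = taken ++ ((PySem.List.sorted l (fun f => f.2)).foldl (pvStep space) (w, [])).2 := by
  intro n
  induction n with
  | zero =>
    intro l hl w taken
    have : l = [] := List.eq_nil_of_length_eq_zero (Nat.le_zero.mp hl)
    subst this
    simp [pvAltGo, PySem.List.min?, PySem.List.sorted]
  | succ n ih =>
    intro l hl w taken
    cases hm : PySem.List.min? l (fun f => f.2) with
    | none =>
      have : l = [] := (PySem.List.min?_eq_none_iff l (fun f => f.2)).mp hm
      subst this
      simp [pvAltGo, PySem.List.min?, PySem.List.sorted]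
    | some m =>
      have hdec := pv_sorted_decomp l m hm
      have hmem : m ∈ l := PySem.List.min?_mem hm
      rw [hdec]
      by_cases hfit : w + m.2 ≥ space
      · -- smallest remaining file does not fit: B stops; A skips everything
        rw [pvAltGo]
        rw [hm]
        simp only [if_pos hfit]
        have hskip : ∀ x ∈ m :: PySem.List.sorted (l.erase m) (fun f => f.2), ¬ (w + x.2 < space) := by
          intro x hx
          rcases List.mem_cons.mp hx with h | h
          · subst h; omega
          · have hxl : x ∈ l.erase m := (PySem.List.mem_sorted _ _ _ _).mp h
            have := PySem.List.min?_isMin hm x (List.mem_of_mem_erase hxl)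
            omega
        rw [pv_skip_all space _ w [] hskip]
        simp
      · -- take m, recurse on the rest
        have hrem : PySem.List.remove? l m = some (l.erase m) :=
          PySem.List.remove?_eq_some_erase l m hmem
        have hlen : (l.erase m).length ≤ n := by
          have := List.length_erase_of_mem hmem
          omega
        rw [pvAltGo]
        rw [hm]
        simp only [if_neg hfit]
        rw [hrem]
        split
        next heq => exact absurd heq (by simp)
        next rest heq =>
        have hre : rest = l.erase m := by
          injection heq with h2; exact h2.symm
        subst hre
        rw [ih (l.erase m) hlen (w + m.2) (taken ++ [m])]
        simp only [List.foldl_cons, pvStep, if_pos (by omega : w + m.2 < space)]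
        rw [pv_acc_prefix space _ (w + m.2) ([] ++ [m])]
        simp

-- ===== VERDICT (by name: the statement is the Claim_ definition above) =====
theorem save_files_number_spec : Claim_equal_save_files_number := by
  intro files space _
  unfold Spec_save_files_number save_files_number save_files_number_alt
  simp only []
  rw [PySem.List.foldl_pyRange_zero_pyGetD' (PySem.List.sorted files (fun x => x.2)) ("", 0)
      (fun (st : Int × List (String × Int)) (f : String × Int) =>
        if st.1 + f.2 < space then (st.1 + f.2, st.2 ++ [f]) else st) (0, [])]
  rw [pv_main space files.length files (le_refl _) 0 []]
  rfl
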